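-- pv_equiv track=rewrite | github.com/supaplextor/logic2-infrared | tests/test_ir_decoder.py | make_rc5_raw
-- ===== SOURCE A (Python) =====
-- def make_rc5_raw(address: int, command: int, toggle: int = 0) -> list:
--     """Generate RC5 Manchester-encoded timing sequence."""
--     RC5_T1 = 889
--     bits = (
--         [1, 1, toggle]
--         + [(address >> (4 - i)) & 1 for i in range(5)]
--         + [(command >> (5 - i)) & 1 for i in range(6)]
--     )
--     # Convert to half-period level sequence
--     half_periods = []
--     for b in bits:
--         if b:
--             half_periods.extend([1, 0])   # HIGH then LOW
--         else:
--             half_periods.extend([0, 1])   # LOW then HIGH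
--     # Compress consecutive same-level half-periods into single timing
--     raw = []
--     i = 0
--     while i < len(half_periods):
--         count = 1
--         while (i + count < len(half_periods)
--                and half_periods[i + count] == half_periods[i]):
--             count += 1
--         raw.append(count * RC5_T1)
--         i += count
--     return raw
-- ===== SOURCE B (Python) =====
-- def make_rc5_raw(address: int, command: int, toggle: int = 0) -> list:
--     """Generate RC5 Manchester-encoded timing sequence (single-pass run-length fold)."""
--     RC5_T1 = 889
--     bits = (
--         [1, 1, toggle]
--         + [(address >> (4 - i)) & 1 for i in range(5)]
--         + [(command >> (5 - i)) & 1 for i in range(6)]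
--     )
--     raw = []
--     cur = None
--     run = 0
--     for b in bits:
--         for lv in ((1, 0) if b else (0, 1)):
--             if lv == cur:
--                 run += 1
--             else:
--                 if cur is not None:
--                     raw.append(run * RC5_T1)
--                 cur, run = lv, 1
--     raw.append(run * RC5_T1)
--     return raw
-- ===== Notes on version B (the rewrite author's own statement) =====
-- stated objective: alternative
-- what changed: B folds Manchester expansion and run-length compression into a single pass over the 14 bits with a (current level, run length) accumulator, instead of materializing the 28-entry half-period list and re-scanning it with an index-based nested while loop.
import Mathlib
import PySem

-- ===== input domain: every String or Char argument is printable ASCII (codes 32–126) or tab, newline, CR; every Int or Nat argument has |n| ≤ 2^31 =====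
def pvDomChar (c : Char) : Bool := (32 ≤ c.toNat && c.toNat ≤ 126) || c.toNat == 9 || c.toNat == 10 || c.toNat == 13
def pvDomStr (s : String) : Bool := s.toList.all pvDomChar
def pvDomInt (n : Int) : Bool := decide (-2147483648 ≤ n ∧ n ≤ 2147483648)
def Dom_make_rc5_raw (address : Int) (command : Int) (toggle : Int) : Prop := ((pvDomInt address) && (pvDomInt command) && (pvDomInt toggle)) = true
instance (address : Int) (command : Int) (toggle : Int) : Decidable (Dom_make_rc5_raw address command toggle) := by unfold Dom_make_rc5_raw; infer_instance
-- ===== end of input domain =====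

-- B folds Manchester expansion and run-length compression into one pass over the 14 bits
-- (no intermediate half-period list, no index-based inner scan); objective: alternative.

-- ===== PORT A =====
-- the bits list (shared Python source line in A and B): Python '>>' is Lean '>>>', '& 1' is PySem.Int.band
def pvBits (address : Int) (command : Int) (toggle : Int) : List Int :=
  [1, 1, toggle]
    ++ (List.range 5).map (fun i => PySem.Int.band (address >>> (4 - i)) 1)
    ++ (List.range 6).map (fun i => PySem.Int.band (command >>> (5 - i)) 1)

-- inner while loop of A: bump count while half_periods[i+count] == half_periods[i]
-- (indices are in range whenever read, so List.getD is exact; fuel = l.length bounds the loop)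
def pvCountRun (l : List Int) (i : Nat) (fuel : Nat) (count : Nat) : Nat :=
  match fuel with
  | 0 => count
  | fuel' + 1 =>
    if i + count < l.length ∧ l.getD (i + count) 0 = l.getD i 0 then
      pvCountRun l i fuel' (count + 1)
    else count

-- outer while loop of A: emit count*889 and advance i by count (fuel = l.length bounds the loop)
def pvRLE (l : List Int) (fuel : Nat) (i : Nat) : List Int :=
  match fuel with
  | 0 => []
  | fuel' + 1 =>
    if i < l.length then
      let c := pvCountRun l i l.length 1
      (c : Int) * 889 :: pvRLE l fuel' (i + c)
    else []

def make_rc5_raw (address : Int) (command : Int) (toggle : Int) : List Int :=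
  let bits := pvBits address command toggle
  -- half_periods: extend by [1,0] if the bit is truthy else [0,1]
  let half_periods := bits.foldl (fun acc b => acc ++ (if b ≠ 0 then [1, 0] else [0, 1])) []
  pvRLE half_periods half_periods.length 0

-- ===== PORT B =====
-- one fold step of B per half-level over the state (cur, run, raw)
def pvStep (st : Option Int × Int × List Int) (lv : Int) : Option Int × Int × List Int :=
  match st with
  | (cur, run, raw) =>
    if cur = some lv then (cur, run + 1, raw)
    else (some lv, 1, match cur with | none => raw | some _ => raw ++ [run * 889])

def make_rc5_raw_alt (address : Int) (command : Int) (toggle : Int) : List Int :=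
  let bits := pvBits address command toggle
  let st := bits.foldl
    (fun st b => ((if b ≠ 0 then [(1 : Int), 0] else [0, 1]).foldl pvStep st))
    (none, 0, [])
  st.2.2 ++ [st.2.1 * 889]

-- ===== PRECONDITION & SPEC =====
def Spec_make_rc5_raw (address : Int) (command : Int) (toggle : Int) (out : List Int) : Prop := out = make_rc5_raw_alt address command toggle
instance (address : Int) (command : Int) (toggle : Int) (out : List Int) : Decidable (Spec_make_rc5_raw address command toggle out) := by unfold Spec_make_rc5_raw; infer_instance

-- ===== CLAIM (what is proved, stated in full; the proofs are below) =====
def Claim_equal_make_rc5_raw : Prop := ∀ (address : Int) (command : Int) (toggle : Int), Dom_make_rc5_raw address command toggle → Spec_make_rc5_raw address command toggle (make_rc5_raw address command toggle)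

-- ===== LEMMAS AND PROOFS =====

-- common intermediate: run-length continuation from a current level `a` with `run` occurrences seen
def pvCont (a : Int) (run : Int) : List Int → List Int
  | [] => [run * 889]
  | x :: xs => if x = a then pvCont a (run + 1) xs else run * 889 :: pvCont x 1 xs

theorem dropWhile_eq_drop_len_takeWhile (p : Int → Bool) (l : List Int) :
    l.dropWhile p = l.drop (l.takeWhile p).length := by
  induction l with
  | nil => rfl
  | cons x xs ih =>
    by_cases h : p x
    · simp [h, ih]
    · simp [h]

theorem pvCountRun_ge (l : List Int) (i : Nat) :
    ∀ fuel count, count ≤ pvCountRun l i fuel count := by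
  intro fuel
  induction fuel with
  | zero => intro count; rw [pvCountRun]
  | succ fuel ih =>
    intro count
    rw [pvCountRun]
    split
    · exact le_trans (by omega) (ih (count + 1))
    · exact le_refl _

theorem pvCountRun_eq_aux (l : List Int) (i : Nat) :
    ∀ fuel count, l.length - (i + count) ≤ fuel →
      pvCountRun l i fuel count = count + ((l.drop (i + count)).takeWhile (· == l.getD i 0)).length := by
  intro fuel
  induction fuel with
  | zero =>
    intro count hc
    rw [pvCountRun, List.drop_eq_nil_of_le (by omega)]
    simp
  | succ fuel ih =>
    intro count hc
    rw [pvCountRun]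
    split
    · next h =>
      rw [List.drop_eq_getElem_cons (h.1)]
      have hx : l[i + count] = l.getD (i + count) 0 := (List.getD_eq_getElem l 0 h.1).symm
      have ih' := ih (count + 1) (by omega)
      rw [← Nat.add_assoc] at ih'
      simp only [List.takeWhile_cons, hx, h.2, beq_self_eq_true, if_true, List.length_cons, ih']
      omega
    · next h =>
      rcases Nat.lt_or_ge (i + count) l.length with hlt | hge
      · have hx : l[i + count] = l.getD (i + count) 0 := (List.getD_eq_getElem l 0 hlt).symm
        have hne : ¬ (l.getD (i + count) 0 = l.getD i 0) := fun hc2 => h ⟨hlt, hc2⟩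
        have hb : (l[i + count] == l.getD i 0) = false := by
          rw [hx]; exact beq_eq_false_iff_ne.mpr hne
        rw [List.drop_eq_getElem_cons hlt]
        simp only [List.takeWhile_cons, hb, Bool.false_eq_true, if_false, List.length_nil,
          Nat.add_zero]
      · rw [List.drop_eq_nil_of_le hge]; simp

theorem pvCountRun_eq (l : List Int) (i count : Nat) :
    pvCountRun l i l.length count = count + ((l.drop (i + count)).takeWhile (· == l.getD i 0)).length :=
  pvCountRun_eq_aux l i l.length count (by omega)

theorem pvCont_unfold (a : Int) (run : Int) (xs : List Int) :
    pvCont a run xs =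
      (run + ((xs.takeWhile (· == a)).length : Int)) * 889 ::
        (match xs.dropWhile (· == a) with
         | [] => []
         | y :: ys => pvCont y 1 ys) := by
  induction xs generalizing run with
  | nil => simp [pvCont]
  | cons x xs ih =>
    by_cases h : x = a
    · simp only [pvCont, h, if_true, List.takeWhile_cons, List.dropWhile_cons,
        beq_self_eq_true, List.length_cons, ih]
      congr 1
      push_cast
      ring
    · have hb : (x == a) = false := by simp [h]
      simp [pvCont, h, hb]

theorem pvRLE_big_index (l : List Int) (fuel i : Nat) (h : l.length ≤ i) :
    pvRLE l fuel i = [] := by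
  cases fuel with
  | zero => rw [pvRLE]
  | succ fuel => rw [pvRLE]; simp only [if_neg (by omega : ¬ i < l.length)]

set_option maxRecDepth 4000 in
theorem pvRLE_eq_pvCont_aux (l : List Int) :
    ∀ fuel i, l.length - i ≤ fuel → i < l.length →
      pvRLE l fuel i = pvCont (l.getD i 0) 1 (l.drop (i + 1)) := by
  intro fuel
  induction fuel with
  | zero => intro i hn hi; omega
  | succ fuel ih =>
    intro i hn hi
    rw [pvRLE]
    simp only [if_pos hi]
    set c := pvCountRun l i l.length 1 with hc
    have hge : 1 ≤ c := pvCountRun_ge l i l.length 1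
    have hcr : c = 1 + ((l.drop (i + 1)).takeWhile (· == l.getD i 0)).length := pvCountRun_eq l i 1
    rw [pvCont_unfold]
    have hdw : (l.drop (i + 1)).dropWhile (· == l.getD i 0) = l.drop (i + c) := by
      rw [dropWhile_eq_drop_len_takeWhile, List.drop_drop]
      congr 1
      omega
    congr 1
    · push_cast [hcr]; ring
    · rw [hdw]
      rcases Nat.lt_or_ge (i + c) l.length with hlt | hge2
      · rw [List.drop_eq_getElem_cons hlt]
        have hx : l[i + c] = l.getD (i + c) 0 := (List.getD_eq_getElem l 0 hlt).symm
        have hrec := ih (i + c) (by omega) hlt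
        show pvRLE l fuel (i + c) = pvCont l[i + c] 1 (List.drop (i + c + 1) l)
        rw [hx]
        exact hrec
      · rw [List.drop_eq_nil_of_le hge2, pvRLE_big_index l fuel (i + c) hge2]

theorem pvRLE_eq_pvCont (l : List Int) (i : Nat) (hi : i < l.length) :
    pvRLE l l.length i = pvCont (l.getD i 0) 1 (l.drop (i + 1)) :=
  pvRLE_eq_pvCont_aux l l.length i (by omega) hi

theorem foldl_pvStep_eq_pvCont (xs : List Int) (a run : Int) (raw : List Int) :
    (xs.foldl pvStep (some a, run, raw)).2.2 ++ [(xs.foldl pvStep (some a, run, raw)).2.1 * 889]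
      = raw ++ pvCont a run xs := by
  induction xs generalizing a run raw with
  | nil => simp [pvCont]
  | cons x xs ih =>
    by_cases h : x = a
    · simp only [List.foldl_cons, pvStep, h, pvCont, if_true, ih]
    · have hne : (some a : Option Int) ≠ some x := by simpa using Ne.symm h
      simp only [List.foldl_cons, pvStep, if_neg hne, ih, pvCont, h, if_false]
      simp

-- core: on any nonempty half-period list the two run-length computations agree
theorem rle_agree (x : Int) (xs : List Int) :
    pvRLE (x :: xs) (x :: xs).length 0 =
      ((x :: xs).foldl pvStep ((none : Option Int), (0 : Int), ([] : List Int))).2.2 ++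
        [((x :: xs).foldl pvStep ((none : Option Int), (0 : Int), ([] : List Int))).2.1 * 889] := by
  have hA : pvRLE (x :: xs) (x :: xs).length 0 = pvCont x 1 xs := by
    have := pvRLE_eq_pvCont (x :: xs) 0 (by simp)
    simpa using this
  have hstep : pvStep ((none : Option Int), (0 : Int), ([] : List Int)) x
      = (some x, 1, ([] : List Int)) := by
    simp [pvStep]
  have hB := foldl_pvStep_eq_pvCont xs x 1 []
  rw [hA, List.foldl_cons, hstep, hB]
  simp

-- the half-period list is the flatMap of the Manchester encoding over the bits
theorem half_periods_eq_flatMap (bits : List Int) :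
    bits.foldl (fun acc b => acc ++ (if b ≠ 0 then [1, 0] else [0, 1])) ([] : List Int)
      = bits.flatMap (fun b => if b ≠ 0 then [1, 0] else [0, 1]) := by
  induction bits using List.reverseRecOn with
  | nil => rfl
  | append_singleton bs b ih => simp [List.foldl_append, List.flatMap_def]

-- ===== VERDICT (by name: the statement is the Claim_ definition above) =====
theorem make_rc5_raw_spec : Claim_equal_make_rc5_raw := by
  intro address command toggle _
  unfold Spec_make_rc5_raw make_rc5_raw make_rc5_raw_alt
  dsimp only
  rw [half_periods_eq_flatMap, ← List.foldl_flatMap]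
  have hbits : pvBits address command toggle
      = 1 :: 1 :: toggle :: ((List.range 5).map (fun i => PySem.Int.band (address >>> (4 - i)) 1)
          ++ (List.range 6).map (fun i => PySem.Int.band (command >>> (5 - i)) 1)) := rfl
  rw [hbits]
  rw [List.flatMap_cons]
  have h1 : (if (1 : Int) ≠ 0 then ([1, 0] : List Int) else [0, 1]) = [1, 0] := by norm_num
  rw [h1]
  simp only [List.cons_append, List.nil_append]
  exact rle_agree _ _
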